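-- pv_equiv track=rewrite | github.com/Lucasbarmat/Algo1 | python/guia7.py | vocales_distintas
-- ===== SOURCE A (Python) =====
-- def pertenece (s:list ,e:int)->bool:
--     for i in range (0,len(s),1):
--         if (s[i] == e):
--             return True
--     return False
--
-- def vocales_distintas(palabra:str)->bool:
--     palabra = palabra.lower()
--     vocales = ['a','e','i','o','u']
--     contador_de_vocales = 0
--     i = 0
--     while (i<len(palabra)) & (contador_de_vocales<3):
--         if pertenece (vocales,palabra[i]):
--             contador_de_vocales += 1
--             vocales.remove(palabra[i])
--         i += 1
--     if contador_de_vocales >= 3: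
--         return True
--     return False
-- ===== SOURCE B (Python) =====
-- def vocales_distintas(palabra: str) -> bool:
--     return len(set(palabra.lower()) & set('aeiou')) >= 3
-- ===== Notes on version B (the rewrite author's own statement) =====
-- stated objective: idiomatic
-- what changed: Replaced the index-driven while loop with a counter, an explicit membership scan (pertenece) and list.remove by a single set intersection: lowercase once, intersect the set of characters with the vowel set and compare its size with 3.
import Mathlib
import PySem

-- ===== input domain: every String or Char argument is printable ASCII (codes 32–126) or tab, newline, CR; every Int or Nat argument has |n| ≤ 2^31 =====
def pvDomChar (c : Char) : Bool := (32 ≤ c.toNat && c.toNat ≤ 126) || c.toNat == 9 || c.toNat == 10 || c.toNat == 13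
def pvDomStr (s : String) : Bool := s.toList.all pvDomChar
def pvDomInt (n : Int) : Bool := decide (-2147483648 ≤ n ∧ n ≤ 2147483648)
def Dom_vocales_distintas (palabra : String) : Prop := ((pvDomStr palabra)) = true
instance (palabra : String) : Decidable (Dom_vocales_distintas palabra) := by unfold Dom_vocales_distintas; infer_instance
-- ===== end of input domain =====

-- B replaces A's while loop + counter + list.remove by one set intersection; objective: idiomatic.

-- ===== PORT A =====
-- helper 'pertenece': linear scan for e in s (the range/index loop as the obvious structural recursion)
def pertenece (s : List Char) (e : Char) : Bool :=
  match s with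
  | [] => false
  | x :: rest => if x == e then true else pertenece rest e

-- the while loop: state (remaining chars, vocales, contador); the (i<len)&(cont<3) condition
-- becomes the match on the char list plus the 'c < 3' guard; 'vocales.remove(ch)' removes the
-- first occurrence of a member, exactly List.erase (membership was just checked by pertenece).
def vdLoop : List Char → List Char → Int → Int
  | [], _, c => c
  | ch :: rest, v, c =>
    if c < 3 then
      if pertenece v ch then vdLoop rest (v.erase ch) (c + 1)
      else vdLoop rest v c
    else c

def vocales_distintas (palabra : String) : Bool :=
  let lowered := (PySem.Str.lower palabra).toList
  let contador := vdLoop lowered ['a', 'e', 'i', 'o', 'u'] 0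
  if contador ≥ 3 then true else false

-- ===== PORT B =====
def vocales_distintas_alt (palabra : String) : Bool :=
  decide (3 ≤ PySem.Set.len (PySem.Set.inter
    (PySem.Set.ofList (PySem.Str.lower palabra).toList)
    (PySem.Set.ofList ['a', 'e', 'i', 'o', 'u'])))

-- ===== PRECONDITION & SPEC =====
def Spec_vocales_distintas (palabra : String) (out : Bool) : Prop := out = vocales_distintas_alt palabra
instance (palabra : String) (out : Bool) : Decidable (Spec_vocales_distintas palabra out) := by unfold Spec_vocales_distintas; infer_instance

-- ===== CLAIM (what is proved, stated in full; the proofs are below) =====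
def Claim_equal_vocales_distintas : Prop := ∀ (palabra : String), Dom_vocales_distintas palabra → Spec_vocales_distintas palabra (vocales_distintas palabra)

-- ===== LEMMAS AND PROOFS =====

theorem pertenece_eq_mem (s : List Char) (e : Char) : pertenece s e = decide (e ∈ s) := by
  induction s with
  | nil => simp [pertenece]
  | cons x rest ih =>
    simp only [pertenece, ih, List.mem_cons]
    by_cases h : x = e
    · subst h; simp
    · have h' : x ≠ e := h
      have h'' : e ≠ x := fun hh => h hh.symm
      simp [h', h'']

-- counting: removing a found vowel and counting it once = counting it among the head char
theorem filter_cons_count (v : List Char) (ch : Char) (rest : List Char)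
    (hv : v.Nodup) (hch : ch ∈ v) :
    (v.filter (fun x => decide (x ∈ ch :: rest))).length
      = ((v.erase ch).filter (fun x => decide (x ∈ rest))).length + 1 := by
  induction v with
  | nil => cases hch
  | cons a v' ih =>
    rcases List.nodup_cons.mp hv with ⟨ha, hv'⟩
    by_cases hac : a = ch
    · subst hac
      have herase : (a :: v').erase a = v' := by simp
      rw [herase]
      have hfc : v'.filter (fun x => decide (x ∈ a :: rest))
          = v'.filter (fun x => decide (x ∈ rest)) := by
        apply List.filter_congr
        intro x hx
        have hxa : x ≠ a := fun h => ha (h ▸ hx)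
        simp [List.mem_cons, hxa]
      have hhead : decide (a ∈ a :: rest) = true := by simp
      rw [List.filter_cons, hhead, if_pos rfl, List.length_cons, hfc]
    · have hch' : ch ∈ v' := by
        rcases List.mem_cons.mp hch with h | h
        · exact absurd h.symm hac
        · exact h
      have herase : (a :: v').erase ch = a :: v'.erase ch := by
        rw [List.erase_cons_tail]
        simp [hac]
      rw [herase]
      have hmem : (a ∈ ch :: rest) ↔ (a ∈ rest) := by
        simp [List.mem_cons, hac]
      by_cases har : a ∈ rest
      · have h1 : a ∈ ch :: rest := hmem.mpr har
        simp only [List.filter_cons, h1, har, decide_true, if_true, List.length_cons]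
        rw [ih hv' hch']
      · have h1 : a ∉ ch :: rest := fun h => har (hmem.mp h)
        simp only [List.filter_cons, h1, har, decide_false]
        exact ih hv' hch'

theorem vdLoop_ge3 (cs : List Char) (v : List Char) (c : Int) (hv : v.Nodup) :
    (3 ≤ vdLoop cs v c) ↔ 3 ≤ c + ((v.filter (fun x => decide (x ∈ cs))).length : Int) := by
  induction cs generalizing v c with
  | nil => simp [vdLoop]
  | cons ch rest ih =>
    by_cases hc : c < 3
    · by_cases hm : ch ∈ v
      · have hp : pertenece v ch = true := by rw [pertenece_eq_mem]; simp [hm]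
        have := ih (v.erase ch) (c + 1) (hv.erase ch)
        rw [show vdLoop (ch :: rest) v c = vdLoop rest (v.erase ch) (c + 1) by
              simp [vdLoop, hc, hp]]
        rw [this, filter_cons_count v ch rest hv hm]
        push_cast
        omega
      · have hp : pertenece v ch = false := by rw [pertenece_eq_mem]; simp [hm]
        have hfc : v.filter (fun x => decide (x ∈ ch :: rest))
            = v.filter (fun x => decide (x ∈ rest)) := by
          apply List.filter_congr
          intro x hx
          have hxc : x ≠ ch := fun h => hm (h ▸ hx)
          simp [List.mem_cons, hxc]
        rw [show vdLoop (ch :: rest) v c = vdLoop rest v c by simp [vdLoop, hc, hp]]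
        rw [ih v c hv, hfc]
    · rw [show vdLoop (ch :: rest) v c = c by simp [vdLoop, hc]]
      constructor
      · intro h
        have : (0 : Int) ≤ ((v.filter (fun x => decide (x ∈ ch :: rest))).length : Int) := by positivity
        omega
      · intro _; omega

-- the two nodup lists (vowels present in cs) and (distinct chars of cs that are vowels) are a permutation
theorem length_filter_eq_inter (cs : List Char) :
    ((['a', 'e', 'i', 'o', 'u'] : List Char).filter (fun x => decide (x ∈ cs))).length
      = (PySem.Set.inter (PySem.Set.ofList cs) (PySem.Set.ofList ['a', 'e', 'i', 'o', 'u'])).length := by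
  apply List.Perm.length_eq
  apply (List.perm_ext_iff_of_nodup _ _).mpr
  · intro x
    rw [PySem.Set.mem_inter, PySem.Set.mem_ofList, PySem.Set.mem_ofList]
    simp only [List.mem_filter, decide_eq_true_eq]
    tauto
  · exact List.Nodup.filter _ (by decide)
  · exact PySem.Set.nodup_inter _ _ (PySem.Set.nodup_ofList cs)

-- ===== VERDICT (by name: the statement is the Claim_ definition above) =====
theorem vocales_distintas_spec : Claim_equal_vocales_distintas := by
  intro palabra _
  unfold Spec_vocales_distintas vocales_distintas vocales_distintas_alt
  set cs := (PySem.Str.lower palabra).toList with hcs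
  have hmain := vdLoop_ge3 cs ['a', 'e', 'i', 'o', 'u'] 0 (by decide)
  have hlen := length_filter_eq_inter cs
  simp only [PySem.Set.len] at *
  by_cases h : 3 ≤ vdLoop cs ['a', 'e', 'i', 'o', 'u'] 0
  · have := hmain.mp h
    simp only [ge_iff_le, h, if_true]
    symm
    rw [decide_eq_true_iff]
    omega
  · have : ¬ 3 ≤ (0 : Int) + ((['a','e','i','o','u'].filter (fun x => decide (x ∈ cs))).length : Int) :=
      fun hh => h (hmain.mpr hh)
    simp only [ge_iff_le, h, if_false]
    symm
    rw [decide_eq_false_iff_not]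
    omega
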